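-- pv_equiv track=rewrite | github.com/drhemanm/ercp-protocol | tests/golden/test_contradiction.py | verify_error_detection
-- ===== SOURCE A (Python) =====
-- from typing import Dict, List, Set
--
-- def verify_error_detection(
--
--     detected_errors: List[Dict],
--     expected_errors: List[Dict]
-- ) -> bool:
--     """
--     Verify that expected errors were detected.
--
--     Args:
--         detected_errors: List of errors detected by ERCP
--         expected_errors: List of expected error specifications
--
--     Returns:
--         True if all critical errors were detected
--     """
--     if not detected_errors:
--         return False
--
--     # Check that each expected error type is represented
--     expected_types = {err["type"] for err in expected_errors}
--     detected_types = {err.get("type") for err in detected_errors}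
--
--     return expected_types.issubset(detected_types)
-- ===== SOURCE B (Python) =====
-- def verify_error_detection(detected_errors, expected_errors):
--     """Single pass over detected_errors, eliminating a shrinking worklist of
--     still-unmet expected types; stop as soon as the worklist is empty."""
--     if not detected_errors:
--         return False
--     remaining = [exp["type"] for exp in expected_errors]
--     for d in detected_errors:
--         t = d.get("type")
--         remaining = [r for r in remaining if r != t]
--         if not remaining:
--             return True
--     return not remaining
-- ===== Notes on version B (the rewrite author's own statement) =====
-- stated objective: alternative
-- what changed: Instead of building two sets and testing subset, B makes a single pass over detected_errors maintaining a shrinking worklist of still-unmet expected types, eliminating matches as it goes and returning True as soon as the worklist empties.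
import Mathlib
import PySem

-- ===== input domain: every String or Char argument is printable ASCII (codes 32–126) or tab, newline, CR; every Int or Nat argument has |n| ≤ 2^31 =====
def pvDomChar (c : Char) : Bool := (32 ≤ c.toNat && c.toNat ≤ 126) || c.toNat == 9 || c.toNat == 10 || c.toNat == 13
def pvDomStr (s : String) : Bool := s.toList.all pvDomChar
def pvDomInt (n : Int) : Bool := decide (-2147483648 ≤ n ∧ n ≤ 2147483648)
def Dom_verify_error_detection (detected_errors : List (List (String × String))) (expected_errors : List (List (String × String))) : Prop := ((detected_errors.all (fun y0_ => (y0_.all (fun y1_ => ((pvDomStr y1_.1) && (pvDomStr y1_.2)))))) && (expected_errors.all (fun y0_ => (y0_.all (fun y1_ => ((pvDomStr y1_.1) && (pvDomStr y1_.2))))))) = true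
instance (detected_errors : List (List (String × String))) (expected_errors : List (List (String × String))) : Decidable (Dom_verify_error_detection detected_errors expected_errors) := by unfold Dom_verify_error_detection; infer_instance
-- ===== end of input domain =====

-- B replaces the two-set subset test by a single pass over detected_errors that shrinks a
-- worklist of unmet expected types (objective: alternative decomposition, same result).

-- ===== PORT A =====
-- Port of A: early empty guard, then set-of-types subset test (Python KeyError on a missing
-- "type" key in expected_errors is excluded by Pre_; it is modelled by `none` entering the set).
def verify_error_detection (detected_errors : List (List (String × String))) (expected_errors : List (List (String × String))) : Bool :=
  if detected_errors = [] then false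
  else
    let expected_types : PySem.Set (Option String) :=
      PySem.Set.ofList (expected_errors.map (fun err => PySem.Dict.get? (PySem.Dict.mk err) "type"))
    let detected_types : PySem.Set (Option String) :=
      PySem.Set.ofList (detected_errors.map (fun err => PySem.Dict.get? (PySem.Dict.mk err) "type"))
    PySem.Set.issubset expected_types detected_types

-- ===== PORT B =====
-- B's loop over detected_errors: filter the worklist by the current type, early-return True
-- when it empties; after the loop, `not remaining`.
def pvAltLoop (ds : List (List (String × String))) (remaining : List (Option String)) : Bool :=
  match ds with
  | [] => remaining = []
  | d :: rest =>
    let t := PySem.Dict.get? (PySem.Dict.mk d) "type"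
    let remaining' := remaining.filter (fun r => r ≠ t)
    if remaining' = [] then true else pvAltLoop rest remaining'

def verify_error_detection_alt (detected_errors : List (List (String × String))) (expected_errors : List (List (String × String))) : Bool :=
  if detected_errors = [] then false
  else
    pvAltLoop detected_errors
      (expected_errors.map (fun exp => PySem.Dict.get? (PySem.Dict.mk exp) "type"))

-- ===== PRECONDITION & SPEC =====
-- Pre_ excludes exactly the inputs where A raises KeyError: detected_errors nonempty while
-- some expected error lacks a "type" key (the set comprehension evaluates err["type"]).
def Pre_verify_error_detection (detected_errors : List (List (String × String))) (expected_errors : List (List (String × String))) : Prop :=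
  detected_errors = [] ∨ ∀ err ∈ expected_errors, (PySem.Dict.get? (PySem.Dict.mk err) "type").isSome
instance (detected_errors : List (List (String × String))) (expected_errors : List (List (String × String))) : Decidable (Pre_verify_error_detection detected_errors expected_errors) := by unfold Pre_verify_error_detection; infer_instance
def pvWitness_verify_error_detection : (List (List (String × String))) × (List (List (String × String))) :=
  ([[("type", "overflow")], [("msg", "x")]], [[("type", "overflow")]])
def Spec_verify_error_detection (detected_errors : List (List (String × String))) (expected_errors : List (List (String × String))) (out : Bool) : Prop := out = verify_error_detection_alt detected_errors expected_errors
instance (detected_errors : List (List (String × String))) (expected_errors : List (List (String × String))) (out : Bool) : Decidable (Spec_verify_error_detection detected_errors expected_errors out) := by unfold Spec_verify_error_detection; infer_instance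

-- ===== CLAIM =====
def Claim_equal_verify_error_detection : Prop := ∀ (detected_errors : List (List (String × String))) (expected_errors : List (List (String × String))), Dom_verify_error_detection detected_errors expected_errors → Pre_verify_error_detection detected_errors expected_errors → Spec_verify_error_detection detected_errors expected_errors (verify_error_detection detected_errors expected_errors)

-- ===== LEMMAS AND PROOFS =====

-- The worklist loop returns true iff every type in the worklist occurs among ds.
theorem pvAltLoop_eq_all (ds : List (List (String × String))) (rem : List (Option String)) :
    pvAltLoop ds rem
      = rem.all (fun r => ds.any (fun dd => PySem.Dict.get? (PySem.Dict.mk dd) "type" == r)) := by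
  induction ds generalizing rem with
  | nil => cases rem <;> simp [pvAltLoop]
  | cons d rest ih =>
    simp only [pvAltLoop]
    by_cases h : rem.filter (fun r => r ≠ PySem.Dict.get? (PySem.Dict.mk d) "type") = []
    · simp only [h, if_true]
      symm
      rw [List.all_eq_true]
      intro r hr
      have : r = PySem.Dict.get? (PySem.Dict.mk d) "type" := by
        by_contra hne
        have hmem : r ∈ rem.filter (fun r => r ≠ PySem.Dict.get? (PySem.Dict.mk d) "type") :=
          List.mem_filter.2 ⟨hr, by simpa using hne⟩
        rw [h] at hmem
        simp at hmem
      simp [List.any_cons, this]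
    · simp only [h, if_false, ih]
      rw [Bool.eq_iff_iff, List.all_eq_true, List.all_eq_true]
      constructor
      · intro hall r hr
        by_cases he : r = PySem.Dict.get? (PySem.Dict.mk d) "type"
        · simp [List.any_cons, he]
        · have := hall r (List.mem_filter.2 ⟨hr, by simpa using he⟩)
          simp [List.any_cons, this]
      · intro hall r hr
        have hm := List.mem_filter.1 hr
        have := hall r hm.1
        have hne : r ≠ PySem.Dict.get? (PySem.Dict.mk d) "type" := by simpa using hm.2
        simp only [List.any_cons, Bool.or_eq_true] at this
        rcases this with h1 | h2
        · exact absurd (beq_iff_eq.1 h1).symm hne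
        · exact h2

-- ===== VERDICT =====
theorem verify_error_detection_spec : Claim_equal_verify_error_detection := by
  intro d e _ _
  unfold Spec_verify_error_detection verify_error_detection verify_error_detection_alt
  by_cases hd : d = []
  · simp [hd]
  · simp only [hd, if_false]
    rw [pvAltLoop_eq_all, Bool.eq_iff_iff, PySem.Set.issubset_iff, List.all_eq_true]
    constructor
    · intro h x hx
      rcases (List.mem_map).1 hx with ⟨exp, hexp, heq⟩
      have := h _ ((PySem.Set.mem_ofList _ _).2 (List.mem_map_of_mem hexp))
      rcases (List.mem_map).1 ((PySem.Set.mem_ofList _ _).1 this) with ⟨dd, hdd, heqd⟩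
      exact (List.any_eq_true).2 ⟨dd, hdd, by simp [heqd, heq]⟩
    · intro h x hx
      rcases (List.mem_map).1 ((PySem.Set.mem_ofList _ _).1 hx) with ⟨exp, hexp, heq⟩
      have := h _ (List.mem_map_of_mem hexp)
      rcases (List.any_eq_true).1 this with ⟨dd, hdd, heqd⟩
      refine (PySem.Set.mem_ofList _ _).2 ((List.mem_map).2 ⟨dd, hdd, ?_⟩)
      have := beq_iff_eq.1 heqd
      simp_all
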